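-- pv_equiv track=rewrite | github.com/yoonalimsuwan/CSOC-SSC-Fold-HTS-Analysis | CSOC‑SSC REAL FOLD PRO v30.4.1 Advanced — Antibody & DNA Origami Design Suite.py | _count_hydrophobic_patches
-- ===== SOURCE A (Python) =====
-- def _count_hydrophobic_patches(seq, threshold=5):
--     """Count contiguous hydrophobic stretches."""
--     patches = 0
--     current = 0
--     for aa in seq:
--         if aa in 'ILVFWY':
--             current += 1
--         else:
--             if current >= threshold:
--                 patches += 1
--             current = 0
--     if current >= threshold:
--         patches += 1
--     return patches
-- ===== SOURCE B (Python) =====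
-- def _count_hydrophobic_patches(seq, threshold=5):
--     """Count contiguous hydrophobic stretches: materialize the maximal runs
--     (is_hydrophobic, run_length), then count the qualifying hydrophobic runs."""
--     runs = []
--     for aa in seq:
--         k = aa in 'ILVFWY'
--         if runs and runs[-1][0] == k:
--             runs[-1][1] += 1
--         else:
--             runs.append([k, 1])
--     return sum(1 for k, n in runs if k and n >= threshold)
-- ===== Notes on version B (the rewrite author's own statement) =====
-- stated objective: alternative
-- what changed: Replaces A's stateful accumulator with flush-at-boundary bookkeeping by a build-runs-then-filter decomposition: first materialize the maximal (is_hydrophobic, length) runs, then count the hydrophobic runs of length >= threshold.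
-- outside the precondition, e.g. on _count_hydrophobic_patches('AA', 0): A returns 3, B returns 0; on _count_hydrophobic_patches('', 0): A returns 1, B returns 0
import Mathlib
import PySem

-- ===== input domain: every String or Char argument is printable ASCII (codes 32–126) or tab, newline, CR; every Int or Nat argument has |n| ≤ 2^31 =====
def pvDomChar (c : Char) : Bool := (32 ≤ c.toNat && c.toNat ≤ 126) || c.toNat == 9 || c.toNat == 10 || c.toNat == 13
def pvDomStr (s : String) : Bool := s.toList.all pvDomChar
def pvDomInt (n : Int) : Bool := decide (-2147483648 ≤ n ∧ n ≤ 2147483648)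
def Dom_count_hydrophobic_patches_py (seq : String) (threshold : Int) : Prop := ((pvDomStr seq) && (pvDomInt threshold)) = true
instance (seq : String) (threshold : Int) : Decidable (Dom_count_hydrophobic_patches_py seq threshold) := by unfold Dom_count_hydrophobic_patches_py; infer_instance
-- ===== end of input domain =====

-- B replaces A's stateful accumulator/flush loop by a build-runs-then-filter decomposition
-- (materialize maximal (is_hydro, length) runs, then count qualifying ones); same O(n) cost.


-- ===== PORT A =====
-- 'aa in "ILVFWY"' : single-character membership in a literal ASCII string
def pvHydro (aa : Char) : Bool := "ILVFWY".toList.contains aa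

def count_hydrophobic_patches_py (seq : String) (threshold : Int) : Int :=
  let st := seq.toList.foldl (fun (st : Int × Int) aa =>
    if pvHydro aa then (st.1, st.2 + 1)
    else if threshold ≤ st.2 then (st.1 + 1, 0) else (st.1, 0)) (0, 0)
  if threshold ≤ st.2 then st.1 + 1 else st.1

-- ===== PORT B =====
-- build the list of maximal runs (is_hydro, length); 'runs[-1]' update = dropLast ++ [bumped last]
def pvBuildRuns (l : List Char) : List (Bool × Int) :=
  l.foldl (fun (runs : List (Bool × Int)) aa =>
    let k := pvHydro aa
    match runs.getLast? with
    | some last => if last.1 == k then runs.dropLast ++ [(k, last.2 + 1)] else runs ++ [(k, 1)]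
    | none => [(k, 1)]) []

def count_hydrophobic_patches_py_alt (seq : String) (threshold : Int) : Int :=
  ((pvBuildRuns seq.toList).filter (fun p => p.1 && threshold ≤ p.2)).length

-- ===== PRECONDITION & SPEC =====
-- Pre_ excludes non-positive thresholds: there every run length trivially meets the bound and the
-- two conventions (A counts an empty patch at every non-hydrophobic boundary, B counts the
-- hydrophobic runs) are both defensible degenerate readings no caller would specify.
def Pre_count_hydrophobic_patches_py (seq : String) (threshold : Int) : Prop := 1 ≤ threshold
instance (seq : String) (threshold : Int) : Decidable (Pre_count_hydrophobic_patches_py seq threshold) := by unfold Pre_count_hydrophobic_patches_py; infer_instance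
def pvWitness_count_hydrophobic_patches_py : String × Int := ("IIIIIAFFFFF", 5)

def Spec_count_hydrophobic_patches_py (seq : String) (threshold : Int) (out : Int) : Prop := out = count_hydrophobic_patches_py_alt seq threshold
instance (seq : String) (threshold : Int) (out : Int) : Decidable (Spec_count_hydrophobic_patches_py seq threshold out) := by unfold Spec_count_hydrophobic_patches_py; infer_instance

-- ===== CLAIM (what is proved, stated in full; the proofs are below) =====
def Claim_equal_count_hydrophobic_patches_py : Prop := ∀ (seq : String) (threshold : Int), Dom_count_hydrophobic_patches_py seq threshold → Pre_count_hydrophobic_patches_py seq threshold → Spec_count_hydrophobic_patches_py seq threshold (count_hydrophobic_patches_py seq threshold)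

-- ===== LEMMAS AND PROOFS =====

-- count of qualifying runs
def pvCountQ (threshold : Int) (rs : List (Bool × Int)) : Int :=
  (rs.filter (fun p => p.1 && threshold ≤ p.2)).length

theorem pvCountQ_nil (threshold : Int) : pvCountQ threshold [] = 0 := rfl

theorem pvCountQ_concat (threshold : Int) (rs : List (Bool × Int)) (k : Bool) (v : Int) :
    pvCountQ threshold (rs ++ [(k, v)]) =
      pvCountQ threshold rs + (if k = true ∧ threshold ≤ v then 1 else 0) := by
  simp only [pvCountQ, List.filter_append, List.length_append]
  by_cases hk : k = true
  · by_cases hv : threshold ≤ v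
    · simp [hk, hv]
    · simp [hk, hv]
  · simp [hk]

-- the invariant relating A's accumulator state to B's materialized runs
def pvRel (threshold : Int) (st : Int × Int) (runs : List (Bool × Int)) : Prop :=
  (runs = [] ∧ st = (0, 0)) ∨
  (∃ rs n, runs = rs ++ [(true, n)] ∧ st = (pvCountQ threshold rs, n)) ∨
  (∃ rs m, runs = rs ++ [(false, m)] ∧ st = (pvCountQ threshold rs, 0))

theorem pvRel_step (threshold : Int) (ht : 1 ≤ threshold) (st : Int × Int)
    (runs : List (Bool × Int)) (aa : Char) (h : pvRel threshold st runs) :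
    pvRel threshold
      (if pvHydro aa then (st.1, st.2 + 1)
       else if threshold ≤ st.2 then (st.1 + 1, 0) else (st.1, 0))
      (let k := pvHydro aa
       match runs.getLast? with
       | some last => if last.1 == k then runs.dropLast ++ [(k, last.2 + 1)] else runs ++ [(k, 1)]
       | none => [(k, 1)]) := by
  have hz : ¬ threshold ≤ (0 : Int) := by omega
  rcases h with ⟨hr, hst⟩ | ⟨rs, n, hr, hst⟩ | ⟨rs, m, hr, hst⟩
  · subst hr; subst hst
    by_cases hk : pvHydro aa
    · simp only [hk, if_true, List.getLast?_nil]
      exact Or.inr (Or.inl ⟨[], 1, rfl, by simp [pvCountQ_nil]⟩)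
    · simp only [hk, if_false, Bool.false_eq_true, List.getLast?_nil, hz, if_false]
      exact Or.inr (Or.inr ⟨[], 1, by simp, by simp [pvCountQ_nil]⟩)
  · subst hr; subst hst
    have hlast : (rs ++ [(true, n)]).getLast? = some (true, n) := List.getLast?_concat
    by_cases hk : pvHydro aa
    · simp only [hk, if_true, hlast, beq_iff_eq, List.dropLast_concat]
      exact Or.inr (Or.inl ⟨rs, n + 1, by simp, rfl⟩)
    · simp only [hk, if_false, Bool.false_eq_true, hlast, beq_iff_eq]
      refine Or.inr (Or.inr ⟨rs ++ [(true, n)], 1, by simp, ?_⟩)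
      rw [pvCountQ_concat]
      by_cases hn : threshold ≤ n
      · simp [hn]
      · simp [hn]
  · subst hr; subst hst
    have hlast : (rs ++ [(false, m)]).getLast? = some (false, m) := List.getLast?_concat
    by_cases hk : pvHydro aa
    · simp only [hk, if_true, hlast, beq_iff_eq]
      refine Or.inr (Or.inl ⟨rs ++ [(false, m)], 1, by simp, ?_⟩)
      rw [pvCountQ_concat]
      simp
    · simp only [hk, if_false, Bool.false_eq_true, hz, if_false, hlast, beq_iff_eq,
        List.dropLast_concat]
      exact Or.inr (Or.inr ⟨rs, m + 1, by simp, rfl⟩)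

theorem pvRel_foldl (threshold : Int) (ht : 1 ≤ threshold) (l : List Char)
    (st : Int × Int) (runs : List (Bool × Int)) (h : pvRel threshold st runs) :
    pvRel threshold
      (l.foldl (fun (st : Int × Int) aa =>
        if pvHydro aa then (st.1, st.2 + 1)
        else if threshold ≤ st.2 then (st.1 + 1, 0) else (st.1, 0)) st)
      (l.foldl (fun (runs : List (Bool × Int)) aa =>
        let k := pvHydro aa
        match runs.getLast? with
        | some last => if last.1 == k then runs.dropLast ++ [(k, last.2 + 1)] else runs ++ [(k, 1)]
        | none => [(k, 1)]) runs) := by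
  induction l generalizing st runs with
  | nil => exact h
  | cons aa tl ih =>
    simp only [List.foldl_cons]
    exact ih _ _ (pvRel_step threshold ht st runs aa h)

theorem pvRel_final (threshold : Int) (ht : 1 ≤ threshold) (st : Int × Int)
    (runs : List (Bool × Int)) (h : pvRel threshold st runs) :
    (if threshold ≤ st.2 then st.1 + 1 else st.1) = pvCountQ threshold runs := by
  have hz : ¬ threshold ≤ (0 : Int) := by omega
  rcases h with ⟨hr, hst⟩ | ⟨rs, n, hr, hst⟩ | ⟨rs, m, hr, hst⟩
  · subst hr; subst hst
    simp [hz, pvCountQ_nil]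
  · subst hr; subst hst
    rw [pvCountQ_concat]
    by_cases hn : threshold ≤ n
    · simp [hn]
    · simp [hn]
  · subst hr; subst hst
    rw [pvCountQ_concat]
    simp [hz]

-- ===== VERDICT (by name: the statement is the Claim_ definition above) =====
theorem count_hydrophobic_patches_py_spec : Claim_equal_count_hydrophobic_patches_py := by
  intro seq threshold _ hpre
  unfold Spec_count_hydrophobic_patches_py
  unfold count_hydrophobic_patches_py count_hydrophobic_patches_py_alt pvBuildRuns
  have h0 : pvRel threshold (0, 0) ([] : List (Bool × Int)) := Or.inl ⟨rfl, rfl⟩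
  have h := pvRel_foldl threshold hpre seq.toList (0, 0) [] h0
  have := pvRel_final threshold hpre _ _ h
  simpa [pvCountQ] using this
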